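-- pv_equiv track=rewrite | github.com/sskeysskey/python_code | Poe_Title.py | process_content_with_empty_lines
-- ===== SOURCE A (Python) =====
-- def process_content_with_empty_lines(text):
--     """
--     处理含有多个空行的文本内容
--     - 如果有超过5个空行，进行特殊处理
--     - 合并没有空行分隔的句子
--     - 保持有空行分隔的句子之间只有一个换行符
--     """
--     # 将文本分割成行
--     lines = text.splitlines()
--
--     # 计算空行数量
--     empty_line_count = sum(1 for line in lines if not line.strip())
--
--     # 如果空行少于5个，直接返回原始文本
--     if empty_line_count <= 5:
--         return text
--
--     # 处理多空行情况
--     result = []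
--     current_segment = []
--
--     for line in lines:
--         if line.strip():  # 非空行
--             current_segment.append(line)
--         else:  # 空行
--             if current_segment:  # 如果当前段落有内容
--                 # 将当前段落合并为一行
--                 result.append(' '.join(current_segment))
--                 current_segment = []
--             if result and not result[-1] == '':  # 确保只添加一个空行
--                 result.append('')
--
--     # 处理最后一个段落
--     if current_segment:
--         result.append(' '.join(current_segment))
--
--     return '\n'.join(result)
-- ===== SOURCE B (Python) =====
-- def process_content_with_empty_lines(text):
--     lines = text.splitlines()
--     if sum(1 for line in lines if not line.strip()) <= 5:
--         return text
--     out = []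
--     i, n = 0, len(lines)
--     while i < n:
--         blank = not lines[i].strip()
--         j = i
--         while j < n and (not lines[j].strip()) == blank:
--             j += 1
--         if blank:
--             if out:
--                 out.append('')
--         else:
--             out.append(' '.join(lines[i:j]))
--         i = j
--     return '\n'.join(out)
-- ===== Notes on version B (the rewrite author's own statement) =====
-- stated objective: alternative
-- what changed: A's single pass with a current_segment accumulator and a last-element-of-result blank-dedup check is replaced by a two-pointer scan over maximal runs of blank/non-blank lines: each non-blank run is joined in one step and each blank run emits at most one empty line by construction.
import Mathlib
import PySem

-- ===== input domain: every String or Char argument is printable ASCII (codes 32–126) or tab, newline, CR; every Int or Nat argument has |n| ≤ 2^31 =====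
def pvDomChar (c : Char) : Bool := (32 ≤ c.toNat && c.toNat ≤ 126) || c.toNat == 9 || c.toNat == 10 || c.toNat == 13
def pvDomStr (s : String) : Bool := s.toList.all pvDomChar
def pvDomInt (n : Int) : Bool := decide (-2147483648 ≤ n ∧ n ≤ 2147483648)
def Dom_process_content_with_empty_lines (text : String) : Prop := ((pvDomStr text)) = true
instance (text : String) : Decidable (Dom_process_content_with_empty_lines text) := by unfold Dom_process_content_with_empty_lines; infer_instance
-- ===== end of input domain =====

-- B replaces A's accumulator loop (current_segment + last-element blank check) by a two-pointer
-- scan over maximal runs of blank/non-blank lines (objective: alternative decomposition, same cost).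

-- `not line.strip()` — the blank-line test both Pythons write
def pvBlank (line : String) : Bool := PySem.Str.strip line == ""

-- ===== PORT A =====
-- the body of A's `for line in lines` loop; state = (result, current_segment)
def pvStepA (st : List String × List String) (line : String) : List String × List String :=
  if pvBlank line = false then (st.1, st.2 ++ [line])
  else
    let result := if st.2 ≠ [] then st.1 ++ [PySem.Str.join " " st.2] else st.1
    let result := if result ≠ [] ∧ result.getLast? ≠ some "" then result ++ [""] else result
    (result, [])

-- A's final `if current_segment: result.append(' '.join(current_segment))`
def pvFlushA (st : List String × List String) : List String :=
  if st.2 ≠ [] then st.1 ++ [PySem.Str.join " " st.2] else st.1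

def process_content_with_empty_lines (text : String) : String :=
  let lines := PySem.Str.splitlines text
  let empty_line_count := (lines.map (fun line => if pvBlank line then (1 : Int) else 0)).sum
  if empty_line_count ≤ 5 then text
  else PySem.Str.join "\n" (pvFlushA (lines.foldl pvStepA ([], [])))

-- ===== PORT B =====
-- B's inner `while j < n and (not lines[j].strip()) == blank: j += 1`
def pvScan (lines : List String) (n : Nat) (blank : Bool) (j : Nat) : Nat :=
  if j < n ∧ (pvBlank (lines.getD j "") == blank) = true then pvScan lines n blank (j + 1) else j
termination_by n - j
decreasing_by omega

-- needed by pvOuter's decreasing_by: the scan never moves left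
theorem pvScan_ge (lines : List String) (n : Nat) (blank : Bool) (j : Nat) :
    j ≤ pvScan lines n blank j := by
  fun_induction pvScan lines n blank j with
  | case1 _ _ ih => omega
  | case2 => omega

-- B's outer `while i < n` loop
def pvOuter (lines : List String) (n : Nat) (i : Nat) (out : List String) : List String :=
  if h : i < n then
    let blank := pvBlank (lines.getD i "")
    let j := pvScan lines n blank i
    let out' := if blank then (if out.isEmpty then out else out ++ [""])
                else out ++ [PySem.Str.join " " (PySem.List.slice lines (some (i : Int)) (some (j : Int)))]
    pvOuter lines n j out'
  else out
termination_by n - i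
decreasing_by
  have h1 : pvScan lines n (pvBlank (lines.getD i "")) i
      = pvScan lines n (pvBlank (lines.getD i "")) (i + 1) := by
    rw [pvScan]; simp [h]
  have h2 := pvScan_ge lines n (pvBlank (lines.getD i "")) (i + 1)
  omega

def process_content_with_empty_lines_alt (text : String) : String :=
  let lines := PySem.Str.splitlines text
  let empty_line_count := (lines.map (fun line => if pvBlank line then (1 : Int) else 0)).sum
  if empty_line_count ≤ 5 then text
  else PySem.Str.join "\n" (pvOuter lines lines.length 0 [])

-- ===== PRECONDITION & SPEC =====
def Spec_process_content_with_empty_lines (text : String) (out : String) : Prop := out = process_content_with_empty_lines_alt text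
instance (text : String) (out : String) : Decidable (Spec_process_content_with_empty_lines text out) := by unfold Spec_process_content_with_empty_lines; infer_instance

-- ===== CLAIM (what is proved, stated in full; the proofs are below) =====
def Claim_equal_process_content_with_empty_lines : Prop := ∀ (text : String), Dom_process_content_with_empty_lines text → Spec_process_content_with_empty_lines text (process_content_with_empty_lines text)

-- ===== LEMMAS AND PROOFS =====

-- common reference recursion: process one maximal blank/non-blank run per step
def pvR : List String → List String → List String
  | [], out => out
  | l :: rest, out =>
    if pvBlank l then
      pvR (rest.dropWhile pvBlank) (if out.isEmpty then out else out ++ [""])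
    else
      pvR (rest.dropWhile (fun x => !pvBlank x))
          (out ++ [PySem.Str.join " " (l :: rest.takeWhile (fun x => !pvBlank x))])
termination_by l _ => l.length
decreasing_by
  · exact Nat.lt_succ_of_le (List.length_dropWhile_le _ _)
  · exact Nat.lt_succ_of_le (List.length_dropWhile_le _ _)

theorem pvBlank_false_toList_ne (c : String) (h : pvBlank c = false) : c.toList ≠ [] := by
  intro hc
  have hce : c = "" := String.toList_inj.mp (by simp [hc])
  subst hce
  have ht : pvBlank "" = true := by decide
  rw [ht] at h; exact Bool.noConfusion h

-- ' '.join of a non-empty list of non-blank lines is never the empty string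
theorem pvJoin_ne (c : String) (cs : List String) (h : pvBlank c = false) :
    PySem.Str.join " " (c :: cs) ≠ "" := by
  intro he
  have h1 : (PySem.Str.join " " (c :: cs)).toList = [] := by rw [he]; rfl
  rw [PySem.Str.toList_join] at h1
  have hc := pvBlank_false_toList_ne c h
  cases cs with
  | nil => rw [List.map_cons, List.map_nil, PySem.Chars.join_singleton] at h1; exact hc h1
  | cons d ds =>
    rw [List.map_cons, List.map_cons, PySem.Chars.join_cons_cons] at h1
    rw [List.append_assoc, List.append_eq_nil_iff] at h1
    exact hc h1.1

theorem pvHead?_dropWhile (p : String → Bool) (l : List String) (x : String)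
    (h : x ∈ (l.dropWhile p).head?) : p x = false := by
  have H := List.head?_dropWhile_not p l
  cases hh : (l.dropWhile p).head? with
  | none => rw [hh] at h; simp at h
  | some y => rw [hh] at H h; simp at h; subst h; exact H

-- folding A's step over blank lines from a ''-terminated (or empty) result is a no-op
theorem pvBlankRun (bs : List String) (out : List String)
    (hb : ∀ b ∈ bs, pvBlank b = true) (ho : out = [] ∨ out.getLast? = some "") :
    bs.foldl pvStepA (out, []) = (out, []) := by
  induction bs with
  | nil => rfl
  | cons b rest ih =>
    rw [List.foldl_cons]
    have hstep : pvStepA (out, []) b = (out, []) := by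
      unfold pvStepA
      rw [hb b (List.mem_cons_self)]
      simp only [ne_eq, not_true_eq_false, reduceIte]
      rcases ho with h | h
      · subst h; simp
      · simp [h]
    rw [hstep]
    exact ih (fun b hb' => hb b (List.mem_cons_of_mem _ hb'))

-- A's final flush of a pending non-blank segment agrees with pvR on empty remaining input
theorem pvA_nil (out cur : List String) (hcur : ∀ c ∈ cur, pvBlank c = false) :
    pvFlushA (out, cur) = pvR cur out := by
  cases cur with
  | nil => simp [pvFlushA, pvR]
  | cons c cs =>
    have hc : pvBlank c = false := hcur c List.mem_cons_self
    rw [pvR]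
    rw [if_neg (by simp [hc])]
    have ht : cs.takeWhile (fun x => !pvBlank x) = cs :=
      List.takeWhile_eq_self_iff.mpr (fun x hx => by simp [hcur x (List.mem_cons_of_mem _ hx)])
    have hd : cs.dropWhile (fun x => !pvBlank x) = [] :=
      List.dropWhile_eq_nil_iff.mpr (fun x hx => by simp [hcur x (List.mem_cons_of_mem _ hx)])
    rw [ht, hd, pvR]
    simp [pvFlushA]

-- main A-side lemma: A's loop with pending segment cur equals pvR on cur ++ lines
theorem pvA_eq_R (N : Nat) : ∀ (lines out cur : List String), lines.length ≤ N →
    (∀ c ∈ cur, pvBlank c = false) →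
    (out.getLast? = some "" → cur ≠ [] ∨ (∀ l ∈ lines.head?, pvBlank l = false)) →
    pvFlushA (lines.foldl pvStepA (out, cur)) = pvR (cur ++ lines) out := by
  induction N with
  | zero =>
    intro lines out cur hlen hcur _
    have : lines = [] := List.eq_nil_of_length_eq_zero (Nat.le_zero.mp hlen)
    subst this
    rw [List.append_nil, List.foldl_nil]
    exact pvA_nil out cur hcur
  | succ N ih =>
    intro lines out cur hlen hcur hho
    cases lines with
    | nil =>
      rw [List.append_nil, List.foldl_nil]
      exact pvA_nil out cur hcur
    | cons l rest =>
      rw [List.foldl_cons]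
      by_cases hb : pvBlank l = true
      · -- blank head: consume the whole blank run
        cases cur with
        | nil =>
          have hno : out.getLast? ≠ some "" := by
            intro he
            rcases hho he with h | h
            · exact h rfl
            · have := h l (by simp)
              rw [hb] at this; exact Bool.noConfusion this
          have hstep : pvStepA (out, []) l = ((if out.isEmpty then out else out ++ [""]), []) := by
            unfold pvStepA
            rw [if_neg (by simp [hb])]
            simp only [ne_eq, not_true_eq_false, reduceIte]
            cases out with
            | nil => simp
            | cons o os => simp [hno]
          rw [hstep]
          set out2 := if out.isEmpty then out else out ++ [""] with hout2
          conv_lhs => rw [← List.takeWhile_append_dropWhile (p := pvBlank) (l := rest)]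
          rw [List.foldl_append]
          rw [pvBlankRun _ out2 (fun b hb' => List.mem_takeWhile_imp hb')
            (by cases out with
                | nil => left; simp [hout2]
                | cons o os => right
                               rw [hout2, if_neg (by simp)]
                               exact List.getLast?_concat)]
          rw [ih (rest.dropWhile pvBlank) out2 []
            (le_trans (List.length_dropWhile_le _ _) (by simpa using hlen))
            (by simp)
            (fun _ => Or.inr (fun x hx => pvHead?_dropWhile _ _ _ hx))]
          rw [List.nil_append, List.nil_append, pvR, if_pos hb]
        | cons c cs =>
          have hc : pvBlank c = false := hcur c List.mem_cons_self
          have hj := pvJoin_ne c cs hc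
          have hstep : pvStepA (out, c :: cs) l
              = (out ++ [PySem.Str.join " " (c :: cs)] ++ [""], []) := by
            unfold pvStepA
            rw [if_neg (by simp [hb])]
            simp only [ne_eq, reduceCtorEq, not_false_eq_true, if_pos]
            rw [if_pos]
            constructor
            · simp
            · rw [List.getLast?_concat]; simp [hj]
          rw [hstep]
          conv_lhs => rw [← List.takeWhile_append_dropWhile (p := pvBlank) (l := rest)]
          rw [List.foldl_append]
          rw [pvBlankRun _ _ (fun b hb' => List.mem_takeWhile_imp hb')
            (Or.inr (List.getLast?_concat))]
          rw [ih (rest.dropWhile pvBlank) _ []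
            (le_trans (List.length_dropWhile_le _ _) (by simpa using hlen))
            (by simp)
            (fun _ => Or.inr (fun x hx => pvHead?_dropWhile _ _ _ hx))]
          rw [List.nil_append]
          rw [List.cons_append, pvR, if_neg (by simp [hc])]
          have ht : (cs ++ l :: rest).takeWhile (fun x => !pvBlank x) = cs := by
            rw [List.takeWhile_append]
            rw [if_pos]
            · rw [List.takeWhile_cons, if_neg (by simp [hb]), List.append_nil]
            · congr 1
              exact List.takeWhile_eq_self_iff.mpr
                (fun x hx => by simp [hcur x (List.mem_cons_of_mem _ hx)])
          have hd : (cs ++ l :: rest).dropWhile (fun x => !pvBlank x) = l :: rest := by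
            rw [List.dropWhile_append]
            rw [if_pos]
            · rw [List.dropWhile_cons, if_neg (by simp [hb])]
            · rw [List.isEmpty_iff]
              exact List.dropWhile_eq_nil_iff.mpr
                (fun x hx => by simp [hcur x (List.mem_cons_of_mem _ hx)])
          rw [ht, hd, pvR, if_pos hb]
          rw [if_neg (by simp)]
      · -- non-blank head: extend the pending segment
        have hb' : pvBlank l = false := by simpa using hb
        have hstep : pvStepA (out, cur) l = (out, cur ++ [l]) := by
          unfold pvStepA; rw [if_pos hb']
        rw [hstep]
        rw [ih rest out (cur ++ [l]) (by simpa using hlen)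
          (by intro c hcm
              rcases List.mem_append.mp hcm with h | h
              · exact hcur c h
              · simp at h; subst h; exact hb')
          (fun _ => Or.inl (by simp))]
        rw [← List.append_cons]

theorem pvDropWhile_eq_drop (p : α → Bool) (l : List α) :
    l.dropWhile p = l.drop (l.takeWhile p).length := by
  induction l with
  | nil => rfl
  | cons x xs ih =>
    by_cases hp : p x = true
    · simp [hp, ih]
    · simp [hp]

-- B-side: the scan returns the end of the maximal run with the head's blankness
theorem pvScan_spec (lines : List String) (b : Bool) : ∀ (K : Nat), ∀ (j : Nat), lines.length - j ≤ K →
    pvScan lines lines.length b j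
      = j + ((lines.drop j).takeWhile (fun x => pvBlank x == b)).length := by
  intro K
  induction K with
  | zero =>
    intro j hK
    have hj : lines.length ≤ j := by omega
    rw [pvScan, if_neg (by omega), List.drop_eq_nil_of_le hj]
    simp
  | succ K ih =>
    intro j hK
    by_cases hj : j < lines.length
    · have hdrop : lines.drop j = lines[j] :: lines.drop (j + 1) := List.drop_eq_getElem_cons hj
      have hget : lines.getD j "" = lines[j] := List.getD_eq_getElem lines "" hj
      rw [pvScan]
      by_cases hp : (pvBlank (lines.getD j "") == b) = true
      · rw [if_pos ⟨hj, hp⟩, ih (j + 1) (by omega), hdrop, List.takeWhile_cons,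
          if_pos (by rw [← hget]; exact hp)]
        simp; omega
      · rw [if_neg (by tauto), hdrop, List.takeWhile_cons, if_neg (by rw [← hget]; exact hp)]
        simp
    · rw [pvScan, if_neg (by omega), List.drop_eq_nil_of_le (by omega)]
      simp

-- main B-side lemma: the two-pointer loop equals pvR on the remaining suffix
theorem pvB_eq_R (lines : List String) : ∀ (K i : Nat) (out : List String),
    lines.length - i ≤ K →
    pvOuter lines lines.length i out = pvR (lines.drop i) out := by
  intro K
  induction K with
  | zero =>
    intro i out hK
    rw [pvOuter, dif_neg (by omega), List.drop_eq_nil_of_le (by omega), pvR]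
  | succ K ih =>
    intro i out hK
    by_cases hi : i < lines.length
    · have hdrop : lines.drop i = lines[i] :: lines.drop (i + 1) := List.drop_eq_getElem_cons hi
      have hget : lines.getD i "" = lines[i] := List.getD_eq_getElem lines "" hi
      rw [pvOuter, dif_pos hi]
      simp only []
      set blank := pvBlank (lines.getD i "") with hblank
      have hscan : pvScan lines lines.length blank i
          = i + 1 + ((lines.drop (i+1)).takeWhile (fun x => pvBlank x == blank)).length := by
        rw [pvScan_spec lines blank (lines.length - i) i (by omega), hdrop,
          List.takeWhile_cons, if_pos (by rw [← hget]; exact beq_self_eq_true _)]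
        simp; omega
      set t := ((lines.drop (i+1)).takeWhile (fun x => pvBlank x == blank)).length with hT
      have hjdrop : lines.drop (i + 1 + t) = (lines.drop (i+1)).dropWhile (fun x => pvBlank x == blank) := by
        rw [pvDropWhile_eq_drop, ← hT, List.drop_drop]
      by_cases hb : blank = true
      · -- blank run
        have hpred : (fun x => pvBlank x == blank) = pvBlank := by
          funext x; rw [hb, beq_true]
        have hbl : pvBlank lines[i] = true := by rw [← hget, ← hblank]; exact hb
        rw [if_pos hb, hscan, ih (i + 1 + t) _ (by omega), hjdrop, hpred]
        rw [hdrop, pvR, if_pos hbl]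
      · -- non-blank run
        have hb' : blank = false := by simpa using hb
        have hpred : (fun x => pvBlank x == blank) = (fun x => !pvBlank x) := by
          funext x; rw [hb', beq_false]
        have hslice : PySem.List.slice lines (some (i : Int)) (some ((pvScan lines lines.length blank i : Nat) : Int))
            = lines[i] :: (lines.drop (i+1)).takeWhile (fun x => !pvBlank x) := by
          rw [PySem.List.slice_natCast, hscan]
          have : i + 1 + t - i = t + 1 := by omega
          rw [this, hdrop, List.take_succ_cons]
          congr 1
          rw [hT, hpred]
          exact (List.prefix_iff_eq_take.mp (List.takeWhile_prefix _)).symm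
        have hbl : ¬ pvBlank lines[i] = true := by rw [← hget, ← hblank]; simp [hb']
        rw [if_neg hb, hscan, ih (i + 1 + t) _ (by omega), hjdrop, hpred]
        rw [hdrop, pvR, if_neg hbl, ← hscan, hslice]
    · rw [pvOuter, dif_neg (by omega), List.drop_eq_nil_of_le (by omega), pvR]

-- ===== VERDICT (by name: the statement is the Claim_ definition above) =====
theorem process_content_with_empty_lines_spec : Claim_equal_process_content_with_empty_lines := by
  intro text _
  unfold Spec_process_content_with_empty_lines
  unfold process_content_with_empty_lines process_content_with_empty_lines_alt
  simp only []
  split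
  · rfl
  · have hA := pvA_eq_R (PySem.Str.splitlines text).length (PySem.Str.splitlines text) [] []
      (le_refl _) (by simp) (by simp)
    have hB := pvB_eq_R (PySem.Str.splitlines text) (PySem.Str.splitlines text).length 0 []
      (by omega)
    simp only [List.nil_append] at hA
    rw [hA, hB, List.drop_zero]
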